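-- pv_equiv track=rewrite | github.com/Clinscott/CStar | src/core/engine/autobot_skill.py | _redact_command
-- ===== SOURCE A (Python) =====
-- from typing import Any, Sequence
--
-- def _redact_command(command: Sequence[str]) -> list[str]:
--     redacted: list[str] = []
--     skip_query_value = False
--     for item in command:
--         if skip_query_value:
--             redacted.append("<prompt omitted>")
--             skip_query_value = False
--             continue
--         if item in {"-q", "--query"}:
--             redacted.append(item)
--             skip_query_value = True
--             continue
--         if item.startswith("--query="):
--             redacted.append("--query=<prompt omitted>")
--             continue
--         redacted.append(item)
--     return redacted
-- ===== SOURCE B (Python) =====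
-- def _redact_command(command):
--     # pass 1: compute the set of indices that must be redacted (value after a bare flag)
--     redact_idx = set()
--     flag = False
--     for i, item in enumerate(command):
--         if flag:
--             redact_idx.add(i)
--             flag = False
--         elif item in ("-q", "--query"):
--             flag = True
--     # pass 2: render each position from the index table
--     return [
--         "<prompt omitted>" if i in redact_idx
--         else ("--query=<prompt omitted>" if item.startswith("--query=") else item)
--         for i, item in enumerate(command)
--     ]
-- ===== Notes on version B (the rewrite author's own statement) =====
-- stated objective: alternative
-- what changed: Replaces A's single stateful pass (a running skip-flag deciding each appended token) with two staged passes: a first scan precomputes the set of indices whose value must be redacted, and a second enumerate-based comprehension renders every position from that index table.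
import Mathlib
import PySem

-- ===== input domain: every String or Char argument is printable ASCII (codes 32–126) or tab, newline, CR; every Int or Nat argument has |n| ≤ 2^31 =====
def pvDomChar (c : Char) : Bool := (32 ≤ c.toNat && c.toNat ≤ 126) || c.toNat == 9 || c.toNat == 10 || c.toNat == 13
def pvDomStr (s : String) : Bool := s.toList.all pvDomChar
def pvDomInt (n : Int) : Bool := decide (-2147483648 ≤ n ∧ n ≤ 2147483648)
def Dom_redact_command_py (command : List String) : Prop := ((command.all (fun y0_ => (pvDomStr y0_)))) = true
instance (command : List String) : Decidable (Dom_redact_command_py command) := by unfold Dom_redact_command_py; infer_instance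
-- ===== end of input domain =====

-- B replaces A's single stateful pass (running skip-flag deciding each token) with two staged
-- passes: a first scan precomputes the set of indices to redact, a second enumerate-based pass
-- renders every position from that index table (alternative decomposition, same cost).


-- ===== PORT A =====
-- one loop iteration of A: state = (redacted list so far, skip_query_value flag)
def redactStepA (st : List String × Bool) (item : String) : List String × Bool :=
  if st.2 then (st.1 ++ ["<prompt omitted>"], false)
  else if item == "-q" || item == "--query" then (st.1 ++ [item], true)
  else if PySem.Str.startswith item "--query=" then (st.1 ++ ["--query=<prompt omitted>"], false)
  else (st.1 ++ [item], false)

def redact_command_py (command : List String) : List String :=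
  (command.foldl redactStepA ([], false)).1

-- ===== PORT B =====
-- B's first pass: state = (redact_idx set, flag); one iteration of the index-collecting loop
def redactStepIdx (st : PySem.Set Int × Bool) (p : Int × String) : PySem.Set Int × Bool :=
  if st.2 then (PySem.Set.add st.1 p.1, false)
  else if p.2 == "-q" || p.2 == "--query" then (st.1, true)
  else (st.1, false)

def redact_command_py_alt (command : List String) : List String :=
  let redactIdx :=
    ((PySem.List.enumerate command).foldl redactStepIdx (PySem.Set.empty, false)).1
  (PySem.List.enumerate command).map (fun p =>
    if PySem.Set.contains redactIdx p.1 then "<prompt omitted>"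
    else if PySem.Str.startswith p.2 "--query=" then "--query=<prompt omitted>"
    else p.2)

-- ===== PRECONDITION & SPEC =====
def Spec_redact_command_py (command : List String) (out : List String) : Prop := out = redact_command_py_alt command
instance (command : List String) (out : List String) : Decidable (Spec_redact_command_py command out) := by unfold Spec_redact_command_py; infer_instance

-- ===== CLAIM (what is proved, stated in full; the proofs are below) =====
def Claim_equal_redact_command_py : Prop := ∀ (command : List String), Dom_redact_command_py command → Spec_redact_command_py command (redact_command_py command)

-- ===== LEMMAS AND PROOFS =====
-- common reference form: A's loop written as recursion on the list with the flag explicit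
def recRedact : Bool → List String → List String
  | _, [] => []
  | true, _ :: ys => "<prompt omitted>" :: recRedact false ys
  | false, x :: ys =>
    if x == "-q" || x == "--query" then x :: recRedact true ys
    else if PySem.Str.startswith x "--query=" then "--query=<prompt omitted>" :: recRedact false ys
    else x :: recRedact false ys

lemma foldA_eq_recRedact (xs : List String) : ∀ (acc : List String) (b : Bool),
    (xs.foldl redactStepA (acc, b)).1 = acc ++ recRedact b xs := by
  induction xs with
  | nil => intro acc b; simp [recRedact]
  | cons x rest ih =>
    intro acc b
    cases b with
    | true =>
      simp only [List.foldl_cons, redactStepA, if_true, recRedact]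
      simpa using ih (acc ++ ["<prompt omitted>"]) false
    | false =>
      by_cases h1 : (x == "-q" || x == "--query") = true
      · simp only [List.foldl_cons, redactStepA, h1, recRedact, Bool.false_eq_true,
          if_false, if_true]
        simpa using ih (acc ++ [x]) true
      · by_cases h2 : PySem.Str.startswith x "--query=" = true
        · simp only [List.foldl_cons, redactStepA, h1, h2, recRedact, Bool.false_eq_true,
            if_false, if_true]
          simpa using ih (acc ++ ["--query=<prompt omitted>"]) false
        · simp only [List.foldl_cons, redactStepA, h1, h2, recRedact, Bool.false_eq_true,
            if_false]
          simpa using ih (acc ++ [x]) false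

-- B's first pass only ever adds to the set
lemma foldIdx_mono (l : List (Int × String)) : ∀ (st : PySem.Set Int × Bool) (i : Int),
    i ∈ st.1 → i ∈ (l.foldl redactStepIdx st).1 := by
  induction l with
  | nil => intro st i h; simpa using h
  | cons p rest ih =>
    intro st i h
    refine ih _ i ?_
    unfold redactStepIdx
    split_ifs <;> simp_all [PySem.Set.mem_add]

-- indices added by the fold over 'enumerate xs k' are ≥ k, so membership of anything < k is unchanged
lemma foldIdx_fresh (xs : List String) : ∀ (k : Int) (st : PySem.Set Int × Bool) (i : Int),
    i < k → (i ∈ ((PySem.List.enumerate xs k).foldl redactStepIdx st).1 ↔ i ∈ st.1) := by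
  induction xs with
  | nil => intro k st i _; simp [PySem.List.enumerate]
  | cons x rest ih =>
    intro k st i hik
    rw [PySem.List.enumerate_cons, List.foldl_cons]
    have hnext : i < k + 1 := by omega
    rw [ih (k + 1) _ i hnext]
    unfold redactStepIdx
    split_ifs <;> (simp_all [PySem.Set.mem_add]; try omega)

-- a bare flag token never starts with "--query="
lemma flag_not_query_eq {x : String} (h : (x == "-q" || x == "--query") = true) :
    PySem.Str.startswith x "--query=" = false := by
  rcases Bool.or_eq_true_iff.mp h with h' | h' <;>
    · rw [show x = _ from eq_of_beq h']; decide

-- main invariant: rendering 'enumerate xs k' with the final set computed from state (S0, b)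
-- (all members of S0 below k) yields exactly A's recursion with flag b
lemma mapRender_eq_recRedact (xs : List String) : ∀ (k : Int) (S0 : PySem.Set Int) (b : Bool),
    (∀ j ∈ S0, j < k) →
    ((PySem.List.enumerate xs k).map (fun p =>
        if PySem.Set.contains ((PySem.List.enumerate xs k).foldl redactStepIdx (S0, b)).1 p.1
        then "<prompt omitted>"
        else if PySem.Str.startswith p.2 "--query=" then "--query=<prompt omitted>"
        else p.2))
      = recRedact b xs := by
  induction xs with
  | nil => intro k S0 b _; simp [PySem.List.enumerate, recRedact]
  | cons x rest ih =>
    intro k S0 b hS0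
    rw [PySem.List.enumerate_cons, List.foldl_cons, List.map_cons]
    set st1 := redactStepIdx (S0, b) (k, x) with hst1
    have hmemSf : ∀ i : Int,
        (PySem.Set.contains ((PySem.List.enumerate rest (k + 1)).foldl redactStepIdx st1).1 i
          = true) ↔ i ∈ ((PySem.List.enumerate rest (k + 1)).foldl redactStepIdx st1).1 :=
      fun i => PySem.Set.contains_iff _ i
    cases b with
    | true =>
      have hst1' : st1 = (PySem.Set.add S0 k, false) := by
        simp [hst1, redactStepIdx]
      -- head index k IS in the final set
      have hk : PySem.Set.contains
          ((PySem.List.enumerate rest (k + 1)).foldl redactStepIdx st1).1 k = true := by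
        rw [hmemSf]
        refine foldIdx_mono _ st1 k ?_
        rw [hst1']; simp [PySem.Set.mem_add]
      rw [hk]
      simp only [if_true, recRedact]
      rw [hst1']
      exact congrArg _ (ih (k + 1) (PySem.Set.add S0 k) false
        (by intro j hj; rw [PySem.Set.mem_add] at hj; rcases hj with h | h
            · exact lt_trans (hS0 j h) (by omega)
            · omega))
    | false =>
      -- head index k is NOT in the final set
      have hknot : PySem.Set.contains
          ((PySem.List.enumerate rest (k + 1)).foldl redactStepIdx st1).1 k = false := by
        rw [Bool.eq_false_iff, Ne, hmemSf]
        rw [foldIdx_fresh rest (k + 1) st1 k (by omega)]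
        have hst1sub : st1.1 = S0 := by
          simp only [hst1, redactStepIdx, Bool.false_eq_true, if_false]
          split_ifs <;> rfl
        rw [hst1sub]
        intro hmem
        exact absurd (hS0 k hmem) (lt_irrefl k)
      rw [hknot]
      simp only [Bool.false_eq_true, if_false]
      by_cases h1 : (x == "-q" || x == "--query") = true
      · have hst1' : st1 = (S0, true) := by simp [hst1, redactStepIdx, h1]
        rw [flag_not_query_eq h1]
        simp only [Bool.false_eq_true, if_false, recRedact, h1, if_true]
        rw [hst1']
        exact congrArg _ (ih (k + 1) S0 true
          (fun j hj => lt_trans (hS0 j hj) (by omega)))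
      · have hst1' : st1 = (S0, false) := by simp [hst1, redactStepIdx, h1]
        by_cases h2 : PySem.Str.startswith x "--query=" = true
        · rw [h2]
          simp only [if_true, recRedact, h1, Bool.false_eq_true, if_false, h2]
          rw [hst1']
          exact congrArg _ (ih (k + 1) S0 false
            (fun j hj => lt_trans (hS0 j hj) (by omega)))
        · rw [Bool.eq_false_iff.mpr h2]
          simp only [Bool.false_eq_true, if_false, recRedact, h1, h2]
          rw [hst1']
          exact congrArg _ (ih (k + 1) S0 false
            (fun j hj => lt_trans (hS0 j hj) (by omega)))

-- ===== VERDICT (by name: the statement is the Claim_ definition above) =====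
theorem redact_command_py_spec : Claim_equal_redact_command_py := by
  intro command _
  unfold Spec_redact_command_py redact_command_py redact_command_py_alt
  rw [show (PySem.List.enumerate command : List (Int × String)) = PySem.List.enumerate command 0 from rfl]
  rw [mapRender_eq_recRedact command 0 PySem.Set.empty false (by intro j hj; simp [PySem.Set.empty] at hj)]
  simpa using foldA_eq_recRedact command [] false
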